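-- pv_equiv track=rewrite | github.com/uclchem/uclpdr | Scripts/plotting_functions.py | convert_species_name
-- ===== SOURCE A (Python) =====
-- def convert_species_name(name):
--     string = ''
--     for i in range(len(name)):
--         if name[i:i+2] == 'p-': string += r'p-' ; continue
--         if name[i:i+2] == 'o-': string += r'o-' ; continue
--         if name[i-1:i+1] == 'p-': continue
--         if name[i-1:i+1] == 'o-': continue
--         if name[i].isalpha(): string += name[i]
--         if name[i].isdigit(): string += r'$_{'+name[i]+'}$'
--         if name[i] == '+': string += r'$^{+}$'
--         if name[i] == '-': string += r'$^{-}$'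
--     string.replace('$$','')
--     return string
-- ===== SOURCE B (Python) =====
-- import re
--
-- def convert_species_name(name):
--     def repl(m):
--         t = m.group()
--         if t == 'p-' or t == 'o-':
--             return t
--         if t.isalpha():
--             return t
--         if t.isdigit():
--             return r'$_{' + t + '}$'
--         if t == '+':
--             return r'$^{+}$'
--         if t == '-':
--             return r'$^{-}$'
--         return ''
--     return re.sub(r'p-|o-|[\s\S]', repl, name)
-- ===== Notes on version B (the rewrite author's own statement) =====
-- stated objective: idiomatic
-- what changed: A's index loop over range(len(name)) with slice lookahead ('p-'/'o-' start here) and slice lookbehind (skip the '-' consumed by the previous iteration) is replaced by a single left-to-right re.sub tokenization (pattern p-|o-|[\s\S] with a replacement callback), which consumes two-character tokens at once so no lookbehind skip is needed.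
import Mathlib
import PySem

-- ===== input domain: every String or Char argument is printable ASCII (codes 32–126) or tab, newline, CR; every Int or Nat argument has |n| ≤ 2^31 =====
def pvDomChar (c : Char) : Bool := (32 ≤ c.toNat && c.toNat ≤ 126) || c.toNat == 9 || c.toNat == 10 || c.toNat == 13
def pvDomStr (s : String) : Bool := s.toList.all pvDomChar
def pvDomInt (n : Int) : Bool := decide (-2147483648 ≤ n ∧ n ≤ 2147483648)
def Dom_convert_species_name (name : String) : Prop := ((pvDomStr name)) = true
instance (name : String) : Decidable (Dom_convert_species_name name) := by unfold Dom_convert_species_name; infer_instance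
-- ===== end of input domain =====

-- B rewrites A's index loop with slice lookbehind/lookahead as a single left-to-right
-- regex-style tokenization (re.sub with a replacement callback): objective 'idiomatic'.

-- ===== PORT A =====
-- the four trailing per-character ifs of A's loop body (sequential, as in the Python)
def convert_species_name_char (c : Char) (acc : String) : String :=
  let acc := if c.isAlpha then acc ++ String.singleton c else acc
  let acc := if c.isDigit then acc ++ "$_{" ++ String.singleton c ++ "}$" else acc
  let acc := if c = '+' then acc ++ "$^{+}$" else acc
  if c = '-' then acc ++ "$^{-}$" else acc

-- 'for i in range(len(name))' with 'continue', as recursion on the index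
def convert_species_name_loop (s : List Char) (i : Nat) (acc : String) : String :=
  if h : i < s.length then
    if PySem.List.slice s (some (i : Int)) (some ((i : Int) + 2)) = ['p', '-'] then
      convert_species_name_loop s (i + 1) (acc ++ "p-")
    else if PySem.List.slice s (some (i : Int)) (some ((i : Int) + 2)) = ['o', '-'] then
      convert_species_name_loop s (i + 1) (acc ++ "o-")
    else if PySem.List.slice s (some ((i : Int) - 1)) (some ((i : Int) + 1)) = ['p', '-'] then
      convert_species_name_loop s (i + 1) acc
    else if PySem.List.slice s (some ((i : Int) - 1)) (some ((i : Int) + 1)) = ['o', '-'] then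
      convert_species_name_loop s (i + 1) acc
    else
      convert_species_name_loop s (i + 1) (convert_species_name_char s[i] acc)
  else acc
termination_by s.length - i

-- (the final `string.replace('$$','')` of A discards its result and is a no-op)
def convert_species_name (name : String) : String :=
  convert_species_name_loop name.toList 0 ""

-- ===== PORT B =====
-- the replacement callback applied to a single-character token (exact port of repl)
def convert_species_name_repl1 (c : Char) : String :=
  if c.isAlpha then String.singleton c
  else if c.isDigit then "$_{" ++ String.singleton c ++ "}$"
  else if c = '+' then "$^{+}$"
  else if c = '-' then "$^{-}$"
  else ""

-- re.sub(r'p-|o-|[\s\S]', repl, ·): left-to-right scan, at each position the first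
-- alternative that matches is consumed ('p-'/'o-' as two-char tokens, else one char)
def convert_species_name_scan : List Char → String
  | [] => ""
  | [c] => convert_species_name_repl1 c
  | c :: d :: r =>
    if (c = 'p' ∨ c = 'o') ∧ d = '-' then
      String.ofList [c, '-'] ++ convert_species_name_scan r
    else
      convert_species_name_repl1 c ++ convert_species_name_scan (d :: r)

def convert_species_name_alt (name : String) : String :=
  convert_species_name_scan name.toList

-- ===== PRECONDITION & SPEC =====
def Spec_convert_species_name (name : String) (out : String) : Prop := out = convert_species_name_alt name
instance (name : String) (out : String) : Decidable (Spec_convert_species_name name out) := by unfold Spec_convert_species_name; infer_instance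

-- ===== CLAIM (what is proved, stated in full; the proofs are below) =====
def Claim_equal_convert_species_name : Prop := ∀ (name : String), Dom_convert_species_name name → Spec_convert_species_name name (convert_species_name name)

-- ===== LEMMAS AND PROOFS =====

lemma csn_not_alpha_of_digit (c : Char) (h : c.isDigit) : ¬ c.isAlpha := by
  simp [Char.isAlpha, Char.isDigit, Char.isUpper, Char.isLower, UInt32.le_iff_toNat_le,
    ge_iff_le] at *
  omega

lemma csn_alpha_ne (c : Char) (h : c.isAlpha) : c ≠ '+' ∧ c ≠ '-' := by
  constructor <;> rintro rfl <;> simp [Char.isAlpha, Char.isUpper, Char.isLower] at h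

lemma csn_digit_ne (c : Char) (h : c.isDigit) : c ≠ '+' ∧ c ≠ '-' := by
  constructor <;> rintro rfl <;> simp [Char.isDigit] at h

-- A's sequential per-character ifs compute exactly B's callback value, appended
lemma csn_char_eq (c : Char) (acc : String) :
    convert_species_name_char c acc = acc ++ convert_species_name_repl1 c := by
  unfold convert_species_name_char convert_species_name_repl1
  refine String.toList_inj.mp ?_
  by_cases hA : c.isAlpha
  · obtain ⟨h1, h2⟩ := csn_alpha_ne c hA
    have hD : ¬ c.isDigit := fun hd => csn_not_alpha_of_digit c hd hA
    simp [hA, hD, h1, h2]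
  · by_cases hD : c.isDigit
    · obtain ⟨h1, h2⟩ := csn_digit_ne c hD
      simp [hA, hD, h1, h2]
    · by_cases hP : c = '+'
      · subst hP; simp [hA, hD]
      · by_cases hM : c = '-' <;> simp [hA, hD, hP, hM]

lemma csn_slice2 (s : List Char) (i : Nat) :
    PySem.List.slice s (some (i : Int)) (some ((i : Int) + 2)) = (s.drop i).take 2 := by
  have h : ((i : Int) + 2) = ((i + 2 : Nat) : Int) := by push_cast; ring
  rw [h, PySem.List.slice_natCast]
  congr 1
  omega

lemma csn_sliceB_succ (s : List Char) (j : Nat) :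
    PySem.List.slice s (some (((j + 1 : Nat) : Int) - 1)) (some (((j + 1 : Nat) : Int) + 1))
      = (s.drop j).take 2 := by
  have h1 : ((j + 1 : Nat) : Int) - 1 = (j : Int) := by push_cast; ring
  have h2 : ((j + 1 : Nat) : Int) + 1 = (j : Int) + 2 := by push_cast; ring
  rw [h1, h2, csn_slice2]

lemma csn_slice_init_len (s : List Char) :
    (PySem.List.slice s (some (((0 : Nat) : Int) - 1)) (some (((0 : Nat) : Int) + 1))).length ≤ 1 := by
  rw [PySem.List.length_slice]
  norm_num

-- main loop invariant: at a token boundary (the previous two characters are not a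
-- 'p-'/'o-' token ending at i), A's loop from i appends B's tokenization of the rest
lemma csn_loop_eq (k : Nat) : ∀ (s : List Char) (i : Nat) (acc : String),
    s.length - i ≤ k →
    PySem.List.slice s (some ((i : Int) - 1)) (some ((i : Int) + 1)) ≠ ['p', '-'] →
    PySem.List.slice s (some ((i : Int) - 1)) (some ((i : Int) + 1)) ≠ ['o', '-'] →
    convert_species_name_loop s i acc = acc ++ convert_species_name_scan (s.drop i) := by
  induction k with
  | zero =>
    intro s i acc hk _ _
    have h : ¬ i < s.length := by omega
    rw [convert_species_name_loop, dif_neg h, List.drop_eq_nil_of_le (by omega)]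
    simp [convert_species_name_scan]
  | succ k ih =>
    intro s i acc hk hb1 hb2
    by_cases h : i < s.length
    · have hd1 : s.drop i = s[i] :: s.drop (i + 1) := List.drop_eq_getElem_cons h
      by_cases hp : (s.drop i).take 2 = ['p', '-'] ∨ (s.drop i).take 2 = ['o', '-']
      · -- a two-character token 'p-' / 'o-' starts at i
        have hlen2 : i + 1 < s.length := by
          by_contra hc
          have hnil : s.drop (i + 1) = [] := List.drop_eq_nil_of_le (by omega)
          rw [hd1, hnil] at hp
          simp at hp
        have hd2 : s.drop (i + 1) = s[i + 1] :: s.drop (i + 2) :=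
          List.drop_eq_getElem_cons hlen2
        have hci : (s[i] = 'p' ∨ s[i] = 'o') ∧ s[i + 1] = '-' := by
          rcases hp with hp | hp <;> rw [hd1, hd2] at hp <;>
            (generalize hg1 : s[i] = x at hp ⊢
             generalize hg2 : s[i + 1] = y at hp ⊢
             simp at hp) <;> tauto
        -- the next iteration's lookahead starts with '-', so it is not a token start
        have hnext1 : (s.drop (i + 1)).take 2 ≠ ['p', '-'] := by
          rw [hd2, hci.2]; simp
        have hnext2 : (s.drop (i + 1)).take 2 ≠ ['o', '-'] := by
          rw [hd2, hci.2]; simp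
        have hib1 : PySem.List.slice s (some ((↑(i + 2) : Int) - 1)) (some ((↑(i + 2) : Int) + 1)) ≠ ['p', '-'] := by
          rw [show i + 2 = (i + 1) + 1 from rfl, csn_sliceB_succ]; exact hnext1
        have hib2 : PySem.List.slice s (some ((↑(i + 2) : Int) - 1)) (some ((↑(i + 2) : Int) + 1)) ≠ ['o', '-'] := by
          rw [show i + 2 = (i + 1) + 1 from rfl, csn_sliceB_succ]; exact hnext2
        rw [convert_species_name_loop, dif_pos h]
        rcases hci.1 with hc | hc
        · have htok : (s.drop i).take 2 = ['p', '-'] := by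
            rw [hd1, hd2, hc, hci.2]; simp
          rw [if_pos (by rw [csn_slice2]; exact htok)]
          rw [convert_species_name_loop, dif_pos hlen2]
          rw [if_neg (by rw [csn_slice2]; exact hnext1)]
          rw [if_neg (by rw [csn_slice2]; exact hnext2)]
          rw [if_pos (by rw [csn_sliceB_succ]; exact htok)]
          rw [ih s (i + 2) _ (by omega) hib1 hib2]
          have hscan : convert_species_name_scan (s.drop i)
              = "p-" ++ convert_species_name_scan (s.drop (i + 2)) := by
            rw [hd1, hd2, hc, hci.2, convert_species_name_scan,
              if_pos ⟨Or.inl rfl, rfl⟩]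
          rw [hscan, String.append_assoc]
        · have htok : (s.drop i).take 2 = ['o', '-'] := by
            rw [hd1, hd2, hc, hci.2]; simp
          rw [if_neg (by rw [csn_slice2, htok]; simp)]
          rw [if_pos (by rw [csn_slice2]; exact htok)]
          rw [convert_species_name_loop, dif_pos hlen2]
          rw [if_neg (by rw [csn_slice2]; exact hnext1)]
          rw [if_neg (by rw [csn_slice2]; exact hnext2)]
          rw [if_neg (by rw [csn_sliceB_succ, htok]; simp)]
          rw [if_pos (by rw [csn_sliceB_succ]; exact htok)]
          rw [ih s (i + 2) _ (by omega) hib1 hib2]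
          have hscan : convert_species_name_scan (s.drop i)
              = "o-" ++ convert_species_name_scan (s.drop (i + 2)) := by
            rw [hd1, hd2, hc, hci.2, convert_species_name_scan,
              if_pos ⟨Or.inr rfl, rfl⟩]
          rw [hscan, String.append_assoc]
      · -- an ordinary single character at i
        rw [not_or] at hp
        rw [convert_species_name_loop, dif_pos h]
        rw [if_neg (by rw [csn_slice2]; exact hp.1)]
        rw [if_neg (by rw [csn_slice2]; exact hp.2)]
        rw [if_neg hb1, if_neg hb2]
        rw [csn_char_eq]
        rw [ih s (i + 1) _ (by omega)
          (by rw [csn_sliceB_succ]; exact hp.1)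
          (by rw [csn_sliceB_succ]; exact hp.2)]
        have hscan : convert_species_name_scan (s.drop i)
            = convert_species_name_repl1 s[i] ++ convert_species_name_scan (s.drop (i + 1)) := by
          rw [hd1]
          cases hrest : s.drop (i + 1) with
          | nil => simp [convert_species_name_scan]
          | cons d r =>
            rw [convert_species_name_scan]
            rw [if_neg]
            rintro ⟨hc, rfl⟩
            have : (s.drop i).take 2 = [s[i], '-'] := by rw [hd1, hrest]; simp
            rcases hc with hc | hc <;> rw [hc] at this
            · exact hp.1 this
            · exact hp.2 this
        rw [hscan, String.append_assoc]
    · rw [convert_species_name_loop, dif_neg h, List.drop_eq_nil_of_le (by omega)]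
      simp [convert_species_name_scan]

-- ===== VERDICT (by name: the statement is the Claim_ definition above) =====
theorem convert_species_name_spec : Claim_equal_convert_species_name := by
  intro name _
  unfold Spec_convert_species_name convert_species_name convert_species_name_alt
  have hb1 : PySem.List.slice name.toList (some (((0 : Nat) : Int) - 1))
      (some (((0 : Nat) : Int) + 1)) ≠ ['p', '-'] := by
    intro h
    have := csn_slice_init_len name.toList
    rw [h] at this
    simp at this
  have hb2 : PySem.List.slice name.toList (some (((0 : Nat) : Int) - 1))
      (some (((0 : Nat) : Int) + 1)) ≠ ['o', '-'] := by
    intro h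
    have := csn_slice_init_len name.toList
    rw [h] at this
    simp at this
  have := csn_loop_eq name.toList.length name.toList 0 "" (by omega)
    (by exact_mod_cast hb1) (by exact_mod_cast hb2)
  rw [this]
  simp
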